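-- pv_equiv track=rewrite | github.com/batuhanbat/CodeJam2022 | Qualification Round/d1000000/slow_d1000000.py | d1000000
-- ===== SOURCE A (Python) =====
-- def d1000000(N, S):
--
--     longest_straight = 0
--     if N <= 4:
--         return N
--
--     if N == 5:
--         if max(S) >= N:
--             return N
--         else:
--             return N-1
--
--     for i in range(0,4):
--         curr_min = min(S)
--         curr_min_index = S.index(curr_min)
--         del S[curr_min_index]
--
--     longest_straight = 4
--
--     i = 4
--     while i < N:
--         if len(S) != 0:
--             if min(S) >= i+1:
--                 min_index = S.index(min(S))
--                 del S[min_index]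
--                 longest_straight += 1
--                 i += 1
--             else:
--                 min_index = S.index(min(S))
--                 del S[min_index]
--                 continue
--         else:
--             break
--
--     return longest_straight
-- ===== SOURCE B (Python) =====
-- def d1000000(N, S):
--     # Note: unlike A, B does not mutate S.
--     if N <= 4:
--         return N
--     if N == 5:
--         return N if max(S) >= N else N - 1
--     cnt = 4
--     for v in sorted(S)[4:]:
--         if cnt >= N:
--             break
--         if v >= cnt + 1:
--             cnt += 1
--     return cnt
-- ===== Notes on version B (the rewrite author's own statement) =====
-- stated objective: faster
-- what changed: B sorts S once and does a single greedy pass over sorted(S)[4:] instead of A's repeated min()/index()/del extraction from the list (keeping A's N<=4 and N==5 special cases); B also does not mutate S.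
import Mathlib
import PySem

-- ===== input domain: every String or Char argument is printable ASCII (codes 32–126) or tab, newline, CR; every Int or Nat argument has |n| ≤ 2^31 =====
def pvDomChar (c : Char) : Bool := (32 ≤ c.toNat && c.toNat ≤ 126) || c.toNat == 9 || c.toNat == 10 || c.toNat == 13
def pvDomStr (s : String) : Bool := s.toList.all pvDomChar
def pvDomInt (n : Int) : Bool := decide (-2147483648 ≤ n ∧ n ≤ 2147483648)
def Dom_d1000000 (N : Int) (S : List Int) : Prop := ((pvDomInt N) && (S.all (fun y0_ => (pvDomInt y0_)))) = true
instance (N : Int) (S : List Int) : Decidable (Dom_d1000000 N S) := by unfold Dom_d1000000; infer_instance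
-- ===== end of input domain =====

-- B replaces A's repeated min-extraction (quadratic) by one sort and a single greedy pass
-- (objective: faster). A mutates its argument S in place for N >= 6; B does not — the
-- equivalence proved here is about the RETURN value only.

-- ===== PORT A =====
-- for i in range(0,4): curr_min = min(S); del S[S.index(curr_min)]
def pvDel4A : Nat → List Int → List Int
  | 0, S => S
  | k+1, S =>
    match PySem.List.min? S (fun x => x) with
    | none => S          -- Python raises ValueError here (min of empty); excluded by Pre_
    | some m =>
      match PySem.List.index? S m with
      | none => S        -- unreachable: the min is in S
      | some idx => pvDel4A k (S.eraseIdx idx)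

-- the while loop: state (i, longest, S); each iteration deletes one element of S
def pvLoopA (N i longest : Int) (S : List Int) : Int :=
  if i < N then
    if S ≠ [] then
      match PySem.List.min? S (fun x => x) with
      | none => longest  -- unreachable: S ≠ []
      | some m =>
        match h : PySem.List.index? S m with
        | none => longest  -- unreachable: the min is in S
        | some idx =>
          if m ≥ i + 1 then pvLoopA N (i + 1) (longest + 1) (S.eraseIdx idx)
          else pvLoopA N i longest (S.eraseIdx idx)
    else longest
  else longest
termination_by S.length
decreasing_by
  all_goals
    have hk := (PySem.List.getElem_of_index?_eq_some h).1
    have := List.length_eraseIdx_of_lt hk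
    omega

def d1000000 (N : Int) (S : List Int) : Int :=
  if N ≤ 4 then N
  else if N = 5 then
    match PySem.List.max? S (fun x => x) with
    | none => 0          -- Python raises ValueError here (max of empty); excluded by Pre_
    | some mx => if mx ≥ N then N else N - 1
  else pvLoopA N 4 4 (pvDel4A 4 S)

-- ===== PORT B =====
-- for v in sorted(S)[4:]: if cnt >= N: break; if v >= cnt+1: cnt += 1
def pvLoopB (N cnt : Int) : List Int → Int
  | [] => cnt
  | v :: t =>
    if cnt ≥ N then cnt
    else if v ≥ cnt + 1 then pvLoopB N (cnt + 1) t
    else pvLoopB N cnt t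

def d1000000_alt (N : Int) (S : List Int) : Int :=
  if N ≤ 4 then N
  else if N = 5 then
    match PySem.List.max? S (fun x => x) with
    | none => 0          -- Python raises ValueError here; excluded by Pre_
    | some mx => if mx ≥ N then N else N - 1
  else
    pvLoopB N 4 (PySem.List.slice (PySem.List.sorted S (fun x => x) false) (some 4) none)

-- ===== PRECONDITION & SPEC =====
-- Pre_ excludes exactly the inputs on which A raises ValueError (min/max of an empty list):
-- N = 5 with S empty, and N ≥ 6 with fewer than 4 elements in S.
def Pre_d1000000 (N : Int) (S : List Int) : Prop :=
  (N = 5 → S ≠ []) ∧ (6 ≤ N → 4 ≤ S.length)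
instance (N : Int) (S : List Int) : Decidable (Pre_d1000000 N S) := by
  unfold Pre_d1000000; infer_instance

def pvWitness_d1000000 : Int × List Int := (6, [3, 1, 2, 5, 4, 6])

def Spec_d1000000 (N : Int) (S : List Int) (out : Int) : Prop := out = d1000000_alt N S
instance (N : Int) (S : List Int) (out : Int) : Decidable (Spec_d1000000 N S out) := by
  unfold Spec_d1000000; infer_instance

-- ===== CLAIM (what is proved, stated in full; the proofs are below) =====
def Claim_equal_d1000000 : Prop :=
  ∀ (N : Int) (S : List Int), Dom_d1000000 N S → Pre_d1000000 N S →
    Spec_d1000000 N S (d1000000 N S)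

-- ===== LEMMAS AND PROOFS =====

-- erasing at the index found by index? is erasing the first occurrence
theorem pvEraseIdx_append (pre suf : List Int) (m : Int) :
    (pre ++ m :: suf).eraseIdx pre.length = pre ++ suf := by
  induction pre with
  | nil => simp
  | cons a t ih => simp [ih]

theorem pvEraseIdx_index? (S : List Int) (m : Int) (idx : Nat)
    (h : PySem.List.index? S m = some idx) : S.eraseIdx idx = S.erase m := by
  obtain ⟨pre, suf, rfl, rfl, hnm⟩ := (PySem.List.index?_eq_some_iff _ _ _).1 h
  rw [pvEraseIdx_append, List.erase_append_right _ (by simpa using hnm)]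
  simp

-- one unfolding step of A's while loop when i < N and S is nonempty
theorem pvLoopA_step (N i longest : Int) (S : List Int) (m : Int) (idx : Nat)
    (hiN : i < N) (hSne : S ≠ [])
    (hmin : PySem.List.min? S (fun x => x) = some m)
    (hidx : PySem.List.index? S m = some idx) :
    pvLoopA N i longest S =
      if m ≥ i + 1 then pvLoopA N (i + 1) (longest + 1) (S.eraseIdx idx)
      else pvLoopA N i longest (S.eraseIdx idx) := by
  rw [pvLoopA]
  rw [if_pos hiN, if_pos hSne, hmin]
  split
  · next heq => cases heq
  · next m' heq =>
    cases heq
    split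
    · next heq2 => rw [hidx] at heq2; cases heq2
    · next idx' heq2 => rw [hidx] at heq2; cases heq2; rfl

-- the head of sorted S is min? S, and erasing it from S sorts to the tail
theorem pvSorted_min_step (S : List Int) (m : Int) (t : List Int)
    (h : PySem.List.sorted S (fun x => x) false = m :: t) :
    PySem.List.min? S (fun x => x) = some m ∧
      PySem.List.sorted (S.erase m) (fun x => x) false = t := by
  have hSne : S ≠ [] := by
    intro hS; rw [hS] at h; simp [PySem.List.sorted] at h
  obtain ⟨m', hm'⟩ : ∃ m', PySem.List.min? S (fun x => x) = some m' := by
    cases hmin : PySem.List.min? S (fun x => x) with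
    | none => exact absurd ((PySem.List.min?_eq_none_iff _ _).1 hmin) hSne
    | some m' => exact ⟨m', rfl⟩
  have hm'S : m' ∈ S := PySem.List.min?_mem hm'
  have hmS : m ∈ S := by
    have : m ∈ PySem.List.sorted S (fun x => x) false := by rw [h]; exact List.mem_cons_self
    exact (PySem.List.mem_sorted S _ false m).1 this
  have hle1 : m' ≤ m := PySem.List.min?_isMin hm' m hmS
  have hle2 : m ≤ m' := PySem.List.key_head_sorted_le S (fun x => x) h m' hm'S
  have hmm : m' = m := le_antisymm hle1 hle2
  subst hmm
  refine ⟨hm', ?_⟩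
  -- S.erase m' is a permutation of t, and t is sorted
  have hperm : (PySem.List.sorted S (fun x => x) false).Perm S :=
    PySem.List.sorted_perm S (fun x => x) false
  have hperm2 : t.Perm (S.erase m') := by
    have := (hperm.symm.erase m')
    rw [h] at this
    simpa using this.symm
  have hpair : (m' :: t).Pairwise (fun a b => a ≤ b) := by
    have := PySem.List.sorted_pairwise (xs := S) (key := fun x => x)
    rwa [h] at this
  exact PySem.List.sorted_id_eq_of_perm_of_pairwise (S.erase m') t hperm2
    (List.Pairwise.of_cons hpair)

-- A's while loop, with its invariant longest = i, equals B's pass over the sorted list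
theorem pvLoopA_eq_loopB (N : Int) (S : List Int) (i : Int) :
    pvLoopA N i i S = pvLoopB N i (PySem.List.sorted S (fun x => x) false) := by
  induction hn : S.length using Nat.strong_induction_on generalizing S i with
  | _ n ih =>
  cases hs : PySem.List.sorted S (fun x => x) false with
  | nil =>
    have hSnil : S = [] := by
      have := (PySem.List.sorted_perm S (fun x => x) false).length_eq
      rw [hs] at this
      exact List.length_eq_zero_iff.mp this.symm
    subst hSnil
    rw [pvLoopA, pvLoopB]
    by_cases hiN : i < N <;> simp [hiN]
  | cons m t =>
    obtain ⟨hmin, ht⟩ := pvSorted_min_step S m t hs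
    have hlenS : S.length = t.length + 1 := by
      have := (PySem.List.sorted_perm S (fun x => x) false).length_eq
      rw [hs] at this
      simpa using this.symm
    have hSne : S ≠ [] := by
      intro hS; rw [hS] at hlenS; simp at hlenS
    have hmS : m ∈ S := PySem.List.min?_mem hmin
    obtain ⟨idx, hidx⟩ : ∃ idx, PySem.List.index? S m = some idx := by
      cases hq : PySem.List.index? S m with
      | none => exact absurd ((PySem.List.index?_eq_none_iff _ _).1 hq) (by simp [hmS])
      | some idx => exact ⟨idx, rfl⟩
    have herase : S.eraseIdx idx = S.erase m := pvEraseIdx_index? S m idx hidx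
    have hlen : (S.erase m).length + 1 = S.length := by
      simpa [List.length_erase_of_mem hmS] using
        (Nat.succ_pred_eq_of_pos (List.length_pos_iff.2 hSne))
    by_cases hiN : i < N
    · rw [pvLoopA_step N i i S m idx hiN hSne hmin hidx, herase]
      have hcnt : ¬ i ≥ N := by omega
      rw [pvLoopB, if_neg hcnt]
      by_cases hcmp : m ≥ i + 1
      · rw [if_pos hcmp, if_pos hcmp,
          ih (S.erase m).length (by omega) (S.erase m) (i + 1) rfl, ht]
      · rw [if_neg hcmp, if_neg hcmp,
          ih (S.erase m).length (by omega) (S.erase m) i rfl, ht]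
    · have hcnt : i ≥ N := by omega
      rw [pvLoopA, if_neg hiN, pvLoopB, if_pos hcnt]

-- deleting the 4 minima then sorting equals dropping 4 from the sorted list
theorem pvDel4A_sorted (k : Nat) (S : List Int) (hk : k ≤ S.length) :
    PySem.List.sorted (pvDel4A k S) (fun x => x) false =
      (PySem.List.sorted S (fun x => x) false).drop k := by
  induction k generalizing S with
  | zero => simp [pvDel4A]
  | succ k ih =>
    cases hs : PySem.List.sorted S (fun x => x) false with
    | nil =>
      exfalso
      have := (PySem.List.sorted_perm S (fun x => x) false).length_eq
      rw [hs] at this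
      have hSnil : S = [] := List.length_eq_zero_iff.mp this.symm
      rw [hSnil] at hk; simp at hk
    | cons m t =>
      obtain ⟨hmin, ht⟩ := pvSorted_min_step S m t hs
      have hmS : m ∈ S := PySem.List.min?_mem hmin
      have hSne : S ≠ [] := by intro hS; rw [hS] at hmS; simp at hmS
      obtain ⟨idx, hidx⟩ : ∃ idx, PySem.List.index? S m = some idx := by
        cases hq : PySem.List.index? S m with
        | none => exact absurd ((PySem.List.index?_eq_none_iff _ _).1 hq) (by simp [hmS])
        | some idx => exact ⟨idx, rfl⟩
      have herase : S.eraseIdx idx = S.erase m := pvEraseIdx_index? S m idx hidx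
      have hlen : (S.erase m).length + 1 = S.length := by
        simpa [List.length_erase_of_mem hmS] using
          (Nat.succ_pred_eq_of_pos (List.length_pos_iff.2 hSne))
      rw [pvDel4A]
      simp only [hmin, hidx, herase]
      rw [ih (S.erase m) (by omega), ht]
      rfl

-- ===== VERDICT (by name: the statement is the Claim_ definition above) =====
theorem d1000000_spec : Claim_equal_d1000000 := by
  intro N S _hdom hpre
  unfold Spec_d1000000 d1000000 d1000000_alt
  by_cases h4 : N ≤ 4
  · simp [h4]
  · by_cases h5 : N = 5
    · simp [h5]
    · have h6 : 6 ≤ N := by omega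
      have hlen : 4 ≤ S.length := hpre.2 h6
      simp only [h4, h5]
      rw [pvLoopA_eq_loopB, pvDel4A_sorted 4 S hlen]
      simp [PySem.List.slice_from]
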